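-- pv_equiv track=rewrite | github.com/jss2001/Algorithm | 240323_day15.py | solution
-- ===== SOURCE A (Python) =====
-- def solution(code):
--     mode = 0
--     ret = ''
--     for idx, i in enumerate(code):
--         if i == '1':
--             mode = 1 - mode
--         elif mode == 0 and idx % 2 == 0:
--             ret += i
--         elif mode == 1 and idx % 2 == 1:
--             ret += i
--
--     if ret == '':
--         ret = "EMPTY"
--     return ret
-- ===== SOURCE B (Python) =====
-- def solution(code):
--     # Between two '1's the mode never changes, so: split the string into
--     # maximal '1'-free segments (the k-th segment runs in mode k % 2), then
--     # take every SECOND character of each segment, starting at the first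
--     # local offset whose global index parity equals that mode.
--     segs = []
--     cur = []
--     for c in code:
--         if c == '1':
--             segs.append(cur)
--             cur = []
--         else:
--             cur.append(c)
--     segs.append(cur)
--
--     out = []
--     pos = 0  # global index where the current segment starts
--     for k, seg in enumerate(segs):
--         j = (k - pos) % 2
--         while j < len(seg):
--             out.append(seg[j])
--             j += 2
--         pos += len(seg) + 1
--     return ''.join(out) or "EMPTY"
-- ===== Notes on version B (the rewrite author's own statement) =====
-- stated objective: alternative
-- what changed: Instead of A's single loop that toggles a mode flag and tests each character's parity, B first splits the string into maximal '1'-free segments (the k-th segment runs in mode k % 2) and then emits every second character of each segment starting from a computed offset, with no per-character mode/parity test.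
import Mathlib
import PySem

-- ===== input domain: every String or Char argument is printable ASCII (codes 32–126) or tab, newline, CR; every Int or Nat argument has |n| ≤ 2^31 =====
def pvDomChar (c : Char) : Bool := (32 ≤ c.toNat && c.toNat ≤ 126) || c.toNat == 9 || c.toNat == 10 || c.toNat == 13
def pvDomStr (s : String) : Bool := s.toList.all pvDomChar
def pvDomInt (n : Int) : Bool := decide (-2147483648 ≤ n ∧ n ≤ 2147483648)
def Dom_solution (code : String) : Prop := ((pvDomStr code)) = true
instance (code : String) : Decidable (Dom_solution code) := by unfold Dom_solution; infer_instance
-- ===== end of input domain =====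

-- B replaces A's single mode-toggling, per-character parity-testing loop by a
-- segment algorithm: split on '1' into segments, then stride through each
-- segment taking every second character (alternative decomposition, same cost).

-- ===== PORT A =====
-- A's for-loop over enumerate(code) with mutable mode/ret, step for step.
def solLoopA : List Char → Int → Int → List Char → List Char
  | [], _, _, ret => ret
  | i :: rest, idx, mode, ret =>
    if i = '1' then solLoopA rest (idx + 1) (1 - mode) ret
    else if mode = 0 ∧ PySem.Int.mod idx 2 = 0 then solLoopA rest (idx + 1) mode (ret ++ [i])
    else if mode = 1 ∧ PySem.Int.mod idx 2 = 1 then solLoopA rest (idx + 1) mode (ret ++ [i])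
    else solLoopA rest (idx + 1) mode ret

def solution (code : String) : String :=
  let ret := solLoopA code.toList 0 0 []
  if ret = [] then "EMPTY" else String.ofList ret

-- ===== PORT B =====
-- Source B's first loop: accumulate the maximal '1'-free segments (segs, cur)
def segLoop : List Char → List (List Char) → List Char → List (List Char) × List Char
  | [], segs, cur => (segs, cur)
  | c :: cs, segs, cur =>
    if c = '1' then segLoop cs (segs ++ [cur]) [] else segLoop cs segs (cur ++ [c])

-- Source B's inner while loop: out.append(seg[j]); j += 2
def strideLoop (seg : List Char) (j : Nat) (out : List Char) : List Char :=
  if h : j < seg.length then strideLoop seg (j + 2) (out ++ [seg[j]]) else out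
  termination_by seg.length - j

-- Source B's second (for k, seg) loop with state pos/out
def outLoop : List (List Char) → Int → Int → List Char → List Char
  | [], _, _, out => out
  | seg :: rest, k, pos, out =>
    outLoop rest (k + 1) (pos + seg.length + 1)
      (strideLoop seg (PySem.Int.mod (k - pos) 2).toNat out)

def solution_alt (code : String) : String :=
  let r := segLoop code.toList [] []
  let segs := r.1 ++ [r.2]
  let out := outLoop segs 0 0 []
  if out = [] then "EMPTY" else String.ofList out

-- ===== PRECONDITION & SPEC =====
def Spec_solution (code : String) (out : String) : Prop := out = solution_alt code
instance (code : String) (out : String) : Decidable (Spec_solution code out) := by unfold Spec_solution; infer_instance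

-- ===== CLAIM (what is proved, stated in full; the proofs are below) =====
def Claim_equal_solution : Prop := ∀ (code : String), Dom_solution code → Spec_solution code (solution code)

-- ===== LEMMAS AND PROOFS =====

-- common characterisation of the kept characters
def keptK : List Char → Int → Int → List Char
  | [], _, _ => []
  | c :: cs, idx, p =>
    if c = '1' then keptK cs (idx + 1) (1 - p)
    else if p = PySem.Int.mod idx 2 then c :: keptK cs (idx + 1) p
    else keptK cs (idx + 1) p

-- every second element (j, j+2, …) of a list
def everyOther : List Char → List Char
  | [] => []
  | [a] => [a]
  | a :: _ :: rest => a :: everyOther rest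

theorem solLoopA_eq_keptK (cs : List Char) : ∀ (idx p : Int) (ret : List Char),
    0 ≤ idx → (p = 0 ∨ p = 1) → solLoopA cs idx p ret = ret ++ keptK cs idx p := by
  induction cs with
  | nil => intro idx p ret _ _; simp [solLoopA, keptK]
  | cons c cs ih =>
    intro idx p ret hidx hp
    have hm : PySem.Int.mod idx 2 = 0 ∨ PySem.Int.mod idx 2 = 1 := by
      simp only [PySem.Int.mod, Int.fmod_eq_emod]; omega
    by_cases hc : c = '1'
    · simp only [solLoopA, keptK, if_pos hc]
      exact ih (idx + 1) (1 - p) ret (by omega) (by omega)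
    · simp only [solLoopA, keptK, if_neg hc]
      by_cases hkeep : p = PySem.Int.mod idx 2
      · have h1 : (p = 0 ∧ PySem.Int.mod idx 2 = 0) ∨ (p = 1 ∧ PySem.Int.mod idx 2 = 1) := by
          rcases hp with h | h <;> rcases hm with h' | h' <;> omega
        rcases h1 with ⟨h1, h2⟩ | ⟨h1, h2⟩
        · rw [if_pos ⟨h1, h2⟩, if_pos hkeep, ih (idx + 1) p (ret ++ [c]) (by omega) hp]
          simp
        · rw [if_neg (by omega), if_pos ⟨h1, h2⟩, if_pos hkeep,
              ih (idx + 1) p (ret ++ [c]) (by omega) hp]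
          simp
      · rw [if_neg (by rcases hp with h | h <;> rcases hm with h' | h' <;> omega),
            if_neg (by rcases hp with h | h <;> rcases hm with h' | h' <;> omega),
            if_neg hkeep]
        exact ih (idx + 1) p ret (by omega) hp

-- pure description of Source B's first loop result
def segsF : List Char → List Char → List (List Char)
  | [], cur => [cur]
  | c :: cs, cur => if c = '1' then cur :: segsF cs [] else segsF cs (cur ++ [c])

theorem segLoop_eq_segsF (cs : List Char) : ∀ (segs : List (List Char)) (cur : List Char),
    (segLoop cs segs cur).1 ++ [(segLoop cs segs cur).2] = segs ++ segsF cs cur := by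
  induction cs with
  | nil => intro segs cur; simp [segLoop, segsF]
  | cons c cs ih =>
    intro segs cur
    by_cases hc : c = '1'
    · simp [segLoop, segsF, hc, ih]
    · simp [segLoop, segsF, hc, ih]

theorem strideLoop_eq_everyOther (seg : List Char) : ∀ (j : Nat) (out : List Char),
    strideLoop seg j out = out ++ everyOther (seg.drop j) := by
  intro j
  induction hn : seg.length - j using Nat.strong_induction_on generalizing j with
  | _ n ih =>
    intro out
    rw [strideLoop]
    by_cases h : j < seg.length
    · rw [dif_pos h, ih (seg.length - (j + 2)) (by omega) (j + 2) rfl]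
      have hdrop : seg.drop j = seg[j] :: seg.drop (j + 1) := List.drop_eq_getElem_cons h
      have : everyOther (seg.drop j) = seg[j] :: everyOther (seg.drop (j + 2)) := by
        rw [hdrop]
        have h2 : seg.drop (j + 2) = List.drop 1 (seg.drop (j + 1)) := by
          rw [List.drop_drop]
        rcases hd : seg.drop (j + 1) with _ | ⟨b, rest⟩
        · simp [h2, hd, everyOther]
        · simp [h2, hd, everyOther]
      simp [this]
    · rw [dif_neg h]
      rw [List.drop_of_length_le (by omega : seg.length ≤ j)]
      simp [everyOther]

-- a '1'-free segment: keptK is exactly the stride from offset (p - pos) % 2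
theorem everyOther_eq_keptK (seg : List Char) : ∀ (pos p : Int),
    '1' ∉ seg → 0 ≤ pos → (p = 0 ∨ p = 1) →
    everyOther (seg.drop (PySem.Int.mod (p - pos) 2).toNat) = keptK seg pos p := by
  induction seg with
  | nil => intro pos p _ _ _; simp [keptK, everyOther]
  | cons c rest ih =>
    intro pos p hno hpos hp
    have hc : c ≠ '1' := by simp at hno; exact fun h => hno.1 h.symm
    have hrest : '1' ∉ rest := by simp at hno; exact hno.2
    have hm : PySem.Int.mod pos 2 = 0 ∨ PySem.Int.mod pos 2 = 1 := by
      simp only [PySem.Int.mod, Int.fmod_eq_emod]; omega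
    simp only [keptK, if_neg hc]
    by_cases hk : p = PySem.Int.mod pos 2
    · have ht : (PySem.Int.mod (p - pos) 2).toNat = 0 := by
        simp only [PySem.Int.mod, Int.fmod_eq_emod] at hk ⊢; omega
      have ht' : (PySem.Int.mod (p - (pos + 1)) 2).toNat = 1 := by
        simp only [PySem.Int.mod, Int.fmod_eq_emod] at hk ⊢; omega
      rw [if_pos hk, ht]
      rw [← ih (pos + 1) p hrest (by omega) hp, ht']
      rcases rest with _ | ⟨b, rest'⟩ <;> simp [everyOther]
    · have ht : (PySem.Int.mod (p - pos) 2).toNat = 1 := by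
        simp only [PySem.Int.mod, Int.fmod_eq_emod] at hk ⊢; omega
      have ht' : (PySem.Int.mod (p - (pos + 1)) 2).toNat = 0 := by
        simp only [PySem.Int.mod, Int.fmod_eq_emod] at hk ⊢; omega
      rw [if_neg hk, ht]
      rw [← ih (pos + 1) p hrest (by omega) hp, ht']
      simp

theorem keptK_append_no1 (seg : List Char) : ∀ (rest : List Char) (idx p : Int),
    '1' ∉ seg → keptK (seg ++ rest) idx p = keptK seg idx p ++ keptK rest (idx + seg.length) p := by
  induction seg with
  | nil => intro rest idx p _; simp [keptK]
  | cons c s ih =>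
    intro rest idx p hno
    have hc : c ≠ '1' := by simp at hno; exact fun h => hno.1 h.symm
    have hs : '1' ∉ s := by simp at hno; exact hno.2
    have harith : idx + 1 + (s.length : Int) = idx + ((c :: s).length : Int) := by
      push_cast [List.length_cons]; ring
    simp only [List.cons_append, keptK, if_neg hc]
    by_cases hk : p = PySem.Int.mod idx 2
    · rw [if_pos hk, if_pos hk, ih rest (idx + 1) p hs, harith]
      simp
    · rw [if_neg hk, if_neg hk, ih rest (idx + 1) p hs, harith]

-- mod-2 parity flip used when crossing a '1'
theorem mod_two_succ (k : Int) (_h : 0 ≤ k) :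
    PySem.Int.mod (k + 1) 2 = 1 - PySem.Int.mod k 2 := by
  simp only [PySem.Int.mod, Int.fmod_eq_emod]; omega

-- main invariant: Source B's second loop over the remaining segments equals keptK
theorem outLoop_segsF_eq (cs : List Char) : ∀ (cur : List Char) (k pos : Int) (out : List Char),
    '1' ∉ cur → 0 ≤ k → 0 ≤ pos →
    outLoop (segsF cs cur) k pos out = out ++ keptK (cur ++ cs) pos (PySem.Int.mod k 2) := by
  induction cs with
  | nil =>
    intro cur k pos out hcur hk hpos
    have hp : PySem.Int.mod k 2 = 0 ∨ PySem.Int.mod k 2 = 1 := by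
      simp only [PySem.Int.mod, Int.fmod_eq_emod]; omega
    have hmk : PySem.Int.mod (PySem.Int.mod k 2 - pos) 2 = PySem.Int.mod (k - pos) 2 := by
      simp only [PySem.Int.mod, Int.fmod_eq_emod]; omega
    simp only [segsF, outLoop, strideLoop_eq_everyOther]
    rw [← hmk, everyOther_eq_keptK cur pos _ hcur hpos hp]
    simp
  | cons c cs ih =>
    intro cur k pos out hcur hk hpos
    have hp : PySem.Int.mod k 2 = 0 ∨ PySem.Int.mod k 2 = 1 := by
      simp only [PySem.Int.mod, Int.fmod_eq_emod]; omega
    by_cases hc : c = '1'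
    · simp only [segsF, if_pos hc, outLoop, strideLoop_eq_everyOther]
      rw [ih [] (k + 1) (pos + cur.length + 1) _ (by simp) (by omega) (by omega)]
      have hmk : PySem.Int.mod (PySem.Int.mod k 2 - pos) 2 = PySem.Int.mod (k - pos) 2 := by
        simp only [PySem.Int.mod, Int.fmod_eq_emod]; omega
      rw [← hmk, everyOther_eq_keptK cur pos _ hcur hpos hp]
      rw [hc, keptK_append_no1 cur ('1' :: cs) pos _ hcur]
      simp only [keptK, List.nil_append, mod_two_succ k hk]
      simp [List.append_assoc]
    · simp only [segsF, if_neg hc]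
      rw [ih (cur ++ [c]) k pos out (by simp [hcur, Ne.symm hc]) hk hpos]
      simp

-- ===== VERDICT (by name: the statement is the Claim_ definition above) =====
theorem solution_spec : Claim_equal_solution := by
  intro code _
  unfold Spec_solution
  have hB : outLoop ((segLoop code.toList [] []).1 ++ [(segLoop code.toList [] []).2]) 0 0 []
      = keptK code.toList 0 0 := by
    rw [segLoop_eq_segsF code.toList [] [], List.nil_append,
        outLoop_segsF_eq code.toList [] 0 0 [] (by simp) le_rfl le_rfl]
    simp [PySem.Int.mod]
  simp only [solution, solution_alt,
    solLoopA_eq_keptK code.toList 0 0 [] le_rfl (Or.inl rfl), List.nil_append, hB]
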